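-- pv_equiv track=rewrite | github.com/yfe404/ROSALIND | frequentWordProblem.py | patternToNumber
-- ===== SOURCE A (Python) =====
-- def patternToNumber(pattern):
--     # A = 0
--     # C = 1
--     # G = 2
--     # T = 3
--
--     sum = 0
--     exp = 0
--
--     for bp in reversed(pattern):
--         if bp == "A":
--             sum += 0
--         elif bp == "C":
--             sum += 4**exp
--         elif bp == "G":
--             sum += 2 * 4**exp
--         else:
--             sum += 3 * 4**exp
--         exp = exp +1
--
--     return sum
-- ===== SOURCE B (Python) =====
-- def patternToNumber(pattern):
--     num = 0
--     for bp in pattern: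
--         num = num * 4 + {"A": 0, "C": 1, "G": 2}.get(bp, 3)
--     return num
-- ===== Notes on version B (the rewrite author's own statement) =====
-- stated objective: faster
-- what changed: Replaces the reversed-scan with per-character 4**exp exponentiation by a single forward Horner pass (num = num*4 + digit), removing the repeated exponentiation.
import Mathlib
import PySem

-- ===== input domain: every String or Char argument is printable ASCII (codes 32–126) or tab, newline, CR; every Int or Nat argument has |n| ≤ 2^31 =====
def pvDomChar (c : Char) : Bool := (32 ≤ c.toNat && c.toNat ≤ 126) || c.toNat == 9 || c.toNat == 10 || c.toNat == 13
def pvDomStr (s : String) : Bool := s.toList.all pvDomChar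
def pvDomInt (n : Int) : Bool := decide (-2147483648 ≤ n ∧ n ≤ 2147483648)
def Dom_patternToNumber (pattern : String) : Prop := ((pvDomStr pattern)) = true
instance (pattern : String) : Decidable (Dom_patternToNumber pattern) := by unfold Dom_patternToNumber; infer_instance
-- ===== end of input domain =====

-- B replaces the reversed scan with repeated 4**exp by a single forward Horner pass (faster in a timing run).


-- ===== PORT A =====
-- A's loop over reversed(pattern) with state (sum, exp), branch order preserved
def pvAFold : List Char → Int → Nat → Int
  | [], s, _ => s
  | bp :: rest, s, e =>
    if bp = 'A' then pvAFold rest (s + 0) (e + 1)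
    else if bp = 'C' then pvAFold rest (s + 4 ^ e) (e + 1)
    else if bp = 'G' then pvAFold rest (s + 2 * 4 ^ e) (e + 1)
    else pvAFold rest (s + 3 * 4 ^ e) (e + 1)

def patternToNumber (pattern : String) : Int :=
  pvAFold pattern.toList.reverse 0 0

-- ===== PORT B =====
-- {"A":0,"C":1,"G":2}.get(bp, 3)
def pvBVal (bp : Char) : Int :=
  (PySem.Dict.ofList [('A', (0 : Int)), ('C', 1), ('G', 2)]).getD bp 3

def pvBFold : List Char → Int → Int
  | [], n => n
  | bp :: rest, n => pvBFold rest (n * 4 + pvBVal bp)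

def patternToNumber_alt (pattern : String) : Int :=
  pvBFold pattern.toList 0

-- ===== PRECONDITION & SPEC =====
def Spec_patternToNumber (pattern : String) (out : Int) : Prop := out = patternToNumber_alt pattern
instance (pattern : String) (out : Int) : Decidable (Spec_patternToNumber pattern out) := by unfold Spec_patternToNumber; infer_instance

-- ===== CLAIM (what is proved, stated in full; the proofs are below) =====
def Claim_equal_patternToNumber : Prop := ∀ (pattern : String), Dom_patternToNumber pattern → Spec_patternToNumber pattern (patternToNumber pattern)

-- ===== LEMMAS AND PROOFS =====

-- positional value: P l = Σ val(l[i]) * 4^i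
def pvP : List Char → Int
  | [] => 0
  | c :: rest => pvBVal c + 4 * pvP rest

theorem pvBVal_eq (c : Char) :
    pvBVal c = if c = 'A' then (0 : Int) else if c = 'C' then 1 else if c = 'G' then 2 else 3 := by
  have h : PySem.Dict.ofList [('A', (0 : Int)), ('C', 1), ('G', 2)]
      = ((PySem.Dict.empty.insert 'A' (0 : Int)).insert 'C' 1).insert 'G' 2 := by decide
  rw [pvBVal, h, PySem.Dict.getD_insert, PySem.Dict.getD_insert, PySem.Dict.getD_insert,
    PySem.Dict.getD_empty]
  by_cases hA : c = 'A' <;> by_cases hC : c = 'C' <;> by_cases hG : c = 'G' <;> simp_all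

theorem pvAFold_eq (l : List Char) (s : Int) (e : Nat) :
    pvAFold l s e = s + 4 ^ e * pvP l := by
  induction l generalizing s e with
  | nil => simp [pvAFold, pvP]
  | cons c rest ih =>
    have hv := pvBVal_eq c
    by_cases hA : c = 'A' <;> by_cases hC : c = 'C' <;> by_cases hG : c = 'G' <;>
      simp_all [pvAFold, pvP, pow_succ] <;> ring

theorem pvP_append (l : List Char) (c : Char) :
    pvP (l ++ [c]) = pvP l + 4 ^ l.length * pvBVal c := by
  induction l with
  | nil => simp [pvP]
  | cons d rest ih => simp [pvP, ih, pow_succ]; ring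

theorem pvBFold_eq (l : List Char) (n : Int) :
    pvBFold l n = n * 4 ^ l.length + pvP l.reverse := by
  induction l generalizing n with
  | nil => simp [pvBFold, pvP]
  | cons c rest ih =>
    simp only [pvBFold, ih, List.reverse_cons, pvP_append, List.length_reverse,
      List.length_cons, pow_succ]
    ring

-- ===== VERDICT (by name: the statement is the Claim_ definition above) =====
theorem patternToNumber_spec : Claim_equal_patternToNumber := by
  intro pattern _
  unfold Spec_patternToNumber patternToNumber patternToNumber_alt
  rw [pvAFold_eq, pvBFold_eq]
  simp
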